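-- pv_equiv track=rewrite | github.com/msucharda/slz-readiness | scripts/slz_readiness/scaffold/prefill.py | classify_keys
-- ===== SOURCE A (Python) =====
-- from typing import Any
--
-- def classify_keys(
--     prefilled: dict[str, dict[str, Any]],
--     user: dict[str, dict[str, Any]],
-- ) -> dict[str, dict[str, str]]:
--     """Return ``{stem: {key: 'derived' | 'operator_override'}}`` for trace.
--
--     Useful for ``trace.jsonl`` + ``scaffold.params.auto.json`` so the
--     operator can see which values the tool chose vs. which they supplied.
--     """
--     out: dict[str, dict[str, str]] = {}
--     for stem in set(prefilled) | set(user):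
--         pre = prefilled.get(stem, {}) or {}
--         usr = user.get(stem, {}) or {}
--         if not isinstance(pre, dict):
--             pre = {}
--         if not isinstance(usr, dict):
--             usr = {}
--         row: dict[str, str] = {}
--         for k in set(pre) | set(usr):
--             if k in usr:
--                 row[k] = "operator_override"
--             else:
--                 row[k] = "derived"
--         if row:
--             out[stem] = row
--     return out
-- ===== SOURCE B (Python) =====
-- from typing import Any
--
-- def classify_keys(
--     prefilled: "dict[str, dict[str, Any]]",
--     user: "dict[str, dict[str, Any]]",
-- ) -> "dict[str, dict[str, str]]":
--     """Staged overlay: seed a row of 'derived' labels for every prefilled stem,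
--     overlay the user dict stem by stem as 'operator_override' (creating rows for
--     user-only stems), and finally drop empty rows.  No stem/key set unions and
--     no per-key membership tests are needed."""
--     out: dict[str, dict[str, str]] = {}
--     for stem, pre in prefilled.items():
--         out[stem] = {k: "derived" for k in pre} if isinstance(pre, dict) else {}
--     for stem, usr in user.items():
--         if isinstance(usr, dict):
--             row = out.setdefault(stem, {})
--             for k in usr:
--                 row[k] = "operator_override"
--     return {stem: row for stem, row in out.items() if row}
-- ===== Notes on version B (the rewrite author's own statement) =====
-- stated objective: alternative
-- what changed: A makes one pass over the union of stems and, per stem, one branching pass over the union of keys with a membership test per key; B never forms a union or tests membership: it seeds rows of 'derived' labels from prefilled, then overlays the user dict entry by entry via setdefault as 'operator_override', and drops empty rows at the end.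
import Mathlib
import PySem

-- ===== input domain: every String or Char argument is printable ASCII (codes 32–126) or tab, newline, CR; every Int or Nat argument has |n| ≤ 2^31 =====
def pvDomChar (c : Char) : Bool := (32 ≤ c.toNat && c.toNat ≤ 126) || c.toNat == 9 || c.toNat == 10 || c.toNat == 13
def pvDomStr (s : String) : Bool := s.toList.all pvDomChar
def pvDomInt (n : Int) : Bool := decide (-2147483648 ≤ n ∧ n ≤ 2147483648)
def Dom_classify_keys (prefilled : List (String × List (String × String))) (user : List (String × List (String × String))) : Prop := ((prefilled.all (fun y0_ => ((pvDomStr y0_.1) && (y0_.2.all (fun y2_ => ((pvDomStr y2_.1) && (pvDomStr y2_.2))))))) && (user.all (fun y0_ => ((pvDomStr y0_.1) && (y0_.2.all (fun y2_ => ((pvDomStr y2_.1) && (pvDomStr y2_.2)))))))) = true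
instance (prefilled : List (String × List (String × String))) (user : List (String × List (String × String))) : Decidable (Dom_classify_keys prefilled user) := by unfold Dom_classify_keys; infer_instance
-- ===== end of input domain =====

-- B replaces A's union-of-stems loop with per-key membership tests by a staged overlay:
-- seed 'derived' rows from prefilled, overlay user entries as 'operator_override' via
-- setdefault, drop empty rows at the end; objective: alternative decomposition, same cost.

-- ===== PORT A =====
-- `prefilled.get(stem, {}) or {}` and the isinstance guards are identities under the type
-- convention (every value IS a dict and `or {}` only replaces a falsy {} by {}), kept as plain getD.
def classify_keys (prefilled : List (String × List (String × String))) (user : List (String × List (String × String))) : List (String × List (String × String)) :=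
  (List.foldl
    (fun out stem =>
      let pre : List (String × String) := PySem.Dict.getD ⟨prefilled⟩ stem []
      let usr : List (String × String) := PySem.Dict.getD ⟨user⟩ stem []
      -- row = {}; for k in set(pre) | set(usr): if k in usr: row[k]='operator_override' else: row[k]='derived'
      let row : PySem.Dict String String :=
        List.foldl
          (fun row k =>
            if PySem.Dict.contains (⟨usr⟩ : PySem.Dict String String) k then
              PySem.Dict.insert row k "operator_override"
            else
              PySem.Dict.insert row k "derived")
          ⟨[]⟩
          (PySem.Set.union (PySem.Set.ofList (pre.map Prod.fst)) (PySem.Set.ofList (usr.map Prod.fst)))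
      if row.items = [] then out else PySem.Dict.insert out stem row.items)
    (⟨[]⟩ : PySem.Dict String (List (String × String)))
    (PySem.Set.union (PySem.Set.ofList (prefilled.map Prod.fst)) (PySem.Set.ofList (user.map Prod.fst)))).items

-- ===== PORT B =====
-- `{k: "derived" for k in pre}` (constant value) is the ordered key dedup paired with the
-- label; `row = out.setdefault(stem, {})` followed by in-place updates of `row` is ported as
-- rebinding `out[stem]` to the updated row (insert keeps an existing stem's position, appends
-- a fresh one — exactly setdefault's placement); the final dict comprehension ranges over a
-- dict's items, whose keys are already distinct, so it is exactly filter-then-project.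
def classify_keys_alt (prefilled : List (String × List (String × String))) (user : List (String × List (String × String))) : List (String × List (String × String)) :=
  let out1 : PySem.Dict String (PySem.Dict String String) :=
    List.foldl
      (fun out p =>
        PySem.Dict.insert out p.1
          ⟨(PySem.List.dedup (p.2.map Prod.fst)).map (fun k => (k, "derived"))⟩)
      ⟨[]⟩ prefilled
  let out2 : PySem.Dict String (PySem.Dict String String) :=
    List.foldl
      (fun out p =>
        let row : PySem.Dict String String := PySem.Dict.getD out p.1 ⟨[]⟩
        let row2 : PySem.Dict String String :=
          List.foldl (fun r k => PySem.Dict.insert r k "operator_override") row (p.2.map Prod.fst)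
        PySem.Dict.insert out p.1 row2)
      out1 user
  (out2.items.filter (fun q => !q.2.items.isEmpty)).map (fun q => (q.1, q.2.items))

-- ===== PRECONDITION & SPEC =====
-- Pre_ excludes association lists with a duplicated key (at the stem level or inside a row):
-- such inputs cannot arise from Python dicts, and on them A's first-match lookup and B's
-- overwrite-in-place orders are both accidental.
def Pre_classify_keys (prefilled : List (String × List (String × String))) (user : List (String × List (String × String))) : Prop :=
  (prefilled.map Prod.fst).Nodup ∧ (user.map Prod.fst).Nodup ∧
  (∀ p ∈ prefilled, (p.2.map Prod.fst).Nodup) ∧ (∀ p ∈ user, (p.2.map Prod.fst).Nodup)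
instance (prefilled : List (String × List (String × String))) (user : List (String × List (String × String))) : Decidable (Pre_classify_keys prefilled user) := by unfold Pre_classify_keys; infer_instance
def pvWitness_classify_keys : (List (String × List (String × String))) × (List (String × List (String × String))) :=
  ([("s", [("a", "1"), ("b", "2")]), ("t", [])], [("s", [("b", "9")]), ("u", [("c", "3")])])

def Spec_classify_keys (prefilled : List (String × List (String × String))) (user : List (String × List (String × String))) (out : List (String × List (String × String))) : Prop := out = classify_keys_alt prefilled user
instance (prefilled : List (String × List (String × String))) (user : List (String × List (String × String))) (out : List (String × List (String × String))) : Decidable (Spec_classify_keys prefilled user out) := by unfold Spec_classify_keys; infer_instance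

-- ===== CLAIM =====
def Claim_equal_classify_keys : Prop := ∀ (prefilled : List (String × List (String × String))) (user : List (String × List (String × String))), Dom_classify_keys prefilled user → Pre_classify_keys prefilled user → Spec_classify_keys prefilled user (classify_keys prefilled user)

-- ===== LEMMAS AND PROOFS =====

-- The canonical row: labels over pre's keys, then usr's fresh keys as overrides.
def pvRow (pre usr : List (String × String)) : List (String × String) :=
  (PySem.List.dedup (pre.map Prod.fst)).map
      (fun k => (k, if (usr.map Prod.fst).contains k then "operator_override" else "derived"))
    ++ ((PySem.List.dedup (usr.map Prod.fst)).filter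
          (fun k => !PySem.Set.contains (PySem.Set.ofList (pre.map Prod.fst)) k)).map
        (fun k => (k, "operator_override"))

-- The canonical result both programs compute: prefilled stems first (labelled rows),
-- then user-only stems, with empty rows dropped.
def pvCanon (prefilled user : List (String × List (String × String))) : List (String × List (String × String)) :=
  ((prefilled.map (fun p => (p.1, pvRow p.2 (PySem.Dict.getD ⟨user⟩ p.1 []))))
    ++ (user.filter (fun p => !PySem.Set.contains (PySem.Set.ofList (prefilled.map Prod.fst)) p.1)).map
        (fun p => (p.1, pvRow [] p.2))).filter (fun q => !q.2.isEmpty)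

theorem foldl_add_of_nodup {α : Type} [BEq α] [LawfulBEq α] :
    ∀ (l : List α) (s : PySem.Set α), (s ++ l).Nodup → List.foldl PySem.Set.add s l = s ++ l := by
  intro l
  induction l with
  | nil => intro s _; simp
  | cons x t ih =>
    intro s h
    have hx : x ∉ s := by
      have := List.disjoint_of_nodup_append h
      intro hm; exact this hm (List.mem_cons_self)
    have hc : PySem.Set.contains s x = false := by
      rw [Bool.eq_false_iff]; intro hc; exact hx ((PySem.Set.contains_iff s x).mp hc)
    have hstep : PySem.Set.add s x = s ++ [x] := by
      simp [PySem.Set.add, hx]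
    rw [List.foldl_cons, hstep, ih (s ++ [x]) (by simpa using h)]
    simp

theorem dedup_of_nodup {α : Type} [BEq α] [LawfulBEq α] (l : List α) (h : l.Nodup) :
    PySem.List.dedup l = l := by
  rw [PySem.List.dedup_eq_ofList, PySem.Set.ofList_eq_foldl]
  simpa using foldl_add_of_nodup l [] (by simpa using h)

theorem items_foldl_insert_const (ov : String) :
    ∀ (ks : List String), ks.Nodup → ∀ (d : PySem.Dict String String),
    (List.foldl (fun r k => PySem.Dict.insert r k ov) d ks).items
      = d.items.map (fun p => if ks.contains p.1 then (p.1, ov) else p)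
        ++ (ks.filter (fun k => !d.contains k)).map (fun k => (k, ov)) := by
  intro ks
  induction ks with
  | nil => intro _ d; simp
  | cons x t ih =>
    intro hnd d
    have hx : x ∉ t := (List.nodup_cons.mp hnd).1
    have ht : t.Nodup := (List.nodup_cons.mp hnd).2
    simp only [List.foldl_cons]
    rw [ih ht]
    by_cases hc : d.contains x = true
    · rw [PySem.Dict.items_insert_of_contains d ov hc, List.map_map]
      have h1 : List.map ((fun p => if t.contains p.1 then (p.1, ov) else p) ∘
            (fun p : String × String => if (p.1 == x) then (x, ov) else p)) d.items
          = List.map (fun p => if (x :: t).contains p.1 then (p.1, ov) else p) d.items := by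
        apply List.map_congr_left
        intro p _
        by_cases he : p.1 = x
        · simp [he]
        · simp [he]
      have h2 : t.filter (fun k => !(d.insert x ov).contains k)
          = (x :: t).filter (fun k => !d.contains k) := by
        rw [List.filter_cons_of_neg (by simp [hc])]
        apply List.filter_congr
        intro k hk
        rw [PySem.Dict.contains_insert]
        have hkx : (k == x) = false := by
          simp only [beq_eq_false_iff_ne]; rintro rfl; exact hx hk
        simp [hkx]
      rw [h1, h2]
    · have hc' : d.contains x = false := by simpa using hc
      rw [PySem.Dict.items_insert_of_not_contains d ov hc', List.map_append]
      have hone : List.map (fun p => if t.contains p.1 then (p.1, ov) else p) [(x, ov)]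
          = [(x, ov)] := by simp
      have hfilter : t.filter (fun k => !(d.insert x ov).contains k)
          = t.filter (fun k => !d.contains k) := by
        apply List.filter_congr
        intro k hk
        rw [PySem.Dict.contains_insert]
        have hkx : (k == x) = false := by
          simp only [beq_eq_false_iff_ne]; rintro rfl; exact hx hk
        simp [hkx]
      have hitems : List.map (fun p => if t.contains p.1 then (p.1, ov) else p) d.items
          = List.map (fun p => if (x :: t).contains p.1 then (p.1, ov) else p) d.items := by
        apply List.map_congr_left
        intro p hp
        have hpx : p.1 ≠ x := by
          intro he
          have : d.contains x = true :=
            (PySem.Dict.contains_iff_mem_keys d x).mpr (he ▸ PySem.Dict.mem_keys_of_mem_items d hp)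
          simp [this] at hc'
        simp [hpx]
      rw [hone, hfilter, hitems, List.filter_cons_of_pos (by simp [hc']), List.map_cons]
      simp

theorem rowA_items (pre usr : List (String × String)) :
    (List.foldl
      (fun row k =>
        if PySem.Dict.contains (⟨usr⟩ : PySem.Dict String String) k then
          PySem.Dict.insert row k "operator_override"
        else
          PySem.Dict.insert row k "derived")
      ⟨[]⟩
      (PySem.Set.union (PySem.Set.ofList (pre.map Prod.fst)) (PySem.Set.ofList (usr.map Prod.fst)))).items
    = pvRow pre usr := by
  set pk := pre.map Prod.fst with hpk
  set uk := usr.map Prod.fst with huk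
  have hcond : ∀ k, PySem.Dict.contains (⟨usr⟩ : PySem.Dict String String) k = uk.contains k := by
    intro k
    rw [PySem.Dict.contains_mk, Bool.eq_iff_iff]
    simp only [List.any_eq_true, List.contains_eq_mem, huk, List.mem_map, decide_eq_true_eq,
      beq_iff_eq]
  have hstep : (fun (row : PySem.Dict String String) k =>
        if PySem.Dict.contains (⟨usr⟩ : PySem.Dict String String) k then
          PySem.Dict.insert row k "operator_override"
        else
          PySem.Dict.insert row k "derived")
      = (fun row k => PySem.Dict.insert row k
          (if uk.contains k then "operator_override" else "derived")) := by
    funext row k; rw [hcond]; split <;> rfl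
  rw [hstep]
  have hSnd : (PySem.Set.union (PySem.Set.ofList pk) (PySem.Set.ofList uk)).Nodup := by
    rw [PySem.Set.union_eq_update]
    exact PySem.Set.nodup_update _ _ (PySem.Set.nodup_ofList pk)
  rw [PySem.Dict.items_foldl_insert_fresh
      (PySem.Set.union (PySem.Set.ofList pk) (PySem.Set.ofList uk))
      (fun k => k)
      (fun k => if uk.contains k then "operator_override" else "derived")
      ⟨[]⟩
      (by intro a _; rw [PySem.Dict.contains_mk]; rfl)
      (by simpa using hSnd)]
  simp only [List.nil_append]
  unfold pvRow
  rw [show PySem.Set.union (PySem.Set.ofList pk) (PySem.Set.ofList uk)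
        = PySem.List.dedup pk ++ (PySem.List.dedup uk).filter
            (fun k => !PySem.Set.contains (PySem.Set.ofList pk) k) from by
      rw [PySem.Set.union_eq_update, PySem.Set.update_eq_append_filter, PySem.Set.ofList_ofList]
      simp [PySem.List.dedup_eq_ofList]]
  rw [List.map_append]
  congr 1
  apply List.map_congr_left
  intro k hk
  have hmem : k ∈ PySem.List.dedup uk := (List.mem_filter.mp hk).1
  have hcontains : uk.contains k = true := by
    simp only [List.contains_eq_mem, decide_eq_true_eq]
    rw [PySem.List.dedup_eq_ofList] at hmem
    exact (PySem.Set.mem_ofList uk k).mp hmem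
  rw [if_pos hcontains]

theorem rowB_items (pre usr : List (String × String)) (h : (usr.map Prod.fst).Nodup) :
    (List.foldl (fun r k => PySem.Dict.insert r k "operator_override")
      ⟨(PySem.List.dedup (pre.map Prod.fst)).map (fun k => (k, "derived"))⟩
      (usr.map Prod.fst)).items
    = pvRow pre usr := by
  set pk := pre.map Prod.fst with hpk
  set uk := usr.map Prod.fst with huk
  have hd0contains : ∀ k : String,
      (PySem.Dict.mk ((PySem.List.dedup pk).map (fun k => (k, "derived")))).contains k
        = PySem.Set.contains (PySem.Set.ofList pk) k := by
    intro k
    rw [PySem.Dict.contains_mk, Bool.eq_iff_iff, PySem.Set.contains_iff]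
    simp only [List.any_map, Function.comp, List.any_eq_true, beq_iff_eq,
      PySem.List.dedup_eq_ofList, PySem.Set.mem_ofList]
    constructor
    · rintro ⟨p, hp, hpk'⟩; exact hpk' ▸ hp
    · intro hm; exact ⟨k, hm, rfl⟩
  rw [items_foldl_insert_const "operator_override" uk h]
  unfold pvRow
  congr 1
  · rw [List.map_map]
    apply List.map_congr_left
    intro k _
    simp only [Function.comp_apply]
    split <;> rfl
  · rw [dedup_of_nodup uk h]
    congr 1
    apply List.filter_congr
    intro k _
    rw [hd0contains k]

theorem cond_insert_items {ν : Type} (f : String → List ν) :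
    ∀ (S : List String) (d : PySem.Dict String (List ν)), S.Nodup →
    (∀ s ∈ S, d.contains s = false) →
    (S.foldl (fun out s => if f s = [] then out else PySem.Dict.insert out s (f s)) d).items
      = d.items ++ (S.filter (fun s => !(f s).isEmpty)).map (fun s => (s, f s)) := by
  intro S
  induction S with
  | nil => intro d _ _; simp
  | cons x t ih =>
    intro d hnd hfresh
    have hx : x ∉ t := (List.nodup_cons.mp hnd).1
    have ht : t.Nodup := (List.nodup_cons.mp hnd).2
    simp only [List.foldl_cons]
    by_cases he : f x = []
    · rw [if_pos he, ih d ht (fun s hs => hfresh s (List.mem_cons_of_mem x hs)),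
        List.filter_cons_of_neg (by simp [he])]
    · rw [if_neg he]
      have hcx : d.contains x = false := hfresh x List.mem_cons_self
      have hfresh' : ∀ s ∈ t, (d.insert x (f x)).contains s = false := by
        intro s hs
        rw [PySem.Dict.contains_insert]
        have hsx : (s == x) = false := by
          simp only [beq_eq_false_iff_ne]; rintro rfl; exact hx hs
        simp [hsx, hfresh s (List.mem_cons_of_mem x hs)]
      rw [ih _ ht hfresh', PySem.Dict.items_insert_of_not_contains d (f x) hcx,
        List.filter_cons_of_pos (by simp [he]), List.map_cons, List.append_assoc]
      rfl

theorem update_items (g : PySem.Dict String String → List (String × String) → PySem.Dict String String) :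
    ∀ (U : List (String × List (String × String))) (d : PySem.Dict String (PySem.Dict String String)),
    (U.map Prod.fst).Nodup → d.keys.Nodup →
    (U.foldl (fun out p => PySem.Dict.insert out p.1 (g (PySem.Dict.getD out p.1 ⟨[]⟩) p.2)) d).items
      = d.items.map (fun q =>
          if PySem.Dict.contains (⟨U⟩ : PySem.Dict String (List (String × String))) q.1 then
            (q.1, g q.2 (PySem.Dict.getD (⟨U⟩ : PySem.Dict String (List (String × String))) q.1 []))
          else q)
        ++ (U.filter (fun p => !(d.contains p.1))).map
            (fun p => (p.1, g (⟨[]⟩ : PySem.Dict String String) p.2)) := by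
  intro U
  induction U with
  | nil => intro d _ _; simp
  | cons u t ih =>
    intro d hnd hkd
    have hu : u.1 ∉ t.map Prod.fst := (List.nodup_cons.mp hnd).1
    have ht : (t.map Prod.fst).Nodup := (List.nodup_cons.mp hnd).2
    have hut : PySem.Dict.contains (⟨t⟩ : PySem.Dict String (List (String × String))) u.1 = false := by
      rw [PySem.Dict.contains_mk]
      simp only [List.any_eq_false]
      intro p hp he
      exact hu ((eq_of_beq he) ▸ List.mem_map_of_mem hp)
    have hmk : ∀ k, PySem.Dict.contains (⟨u :: t⟩ : PySem.Dict String (List (String × String))) k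
        = ((k == u.1) || PySem.Dict.contains (⟨t⟩ : PySem.Dict String (List (String × String))) k) := by
      intro k
      rw [PySem.Dict.contains_mk, PySem.Dict.contains_mk, List.any_cons]
      cases h : (k == u.1)
      · have : (u.1 == k) = false := by
          simp only [beq_eq_false_iff_ne] at h ⊢; exact fun he => h he.symm
        simp [this]
      · have : (u.1 == k) = true := by
          simp only [beq_iff_eq] at h ⊢; exact h.symm
        simp [this]
    have hget : ∀ k, k ≠ u.1 →
        PySem.Dict.getD (⟨u :: t⟩ : PySem.Dict String (List (String × String))) k []
          = PySem.Dict.getD (⟨t⟩ : PySem.Dict String (List (String × String))) k [] := by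
      intro k hk
      rw [PySem.Dict.getD_eq_get?_getD, PySem.Dict.getD_eq_get?_getD, PySem.Dict.get?_mk_cons]
      have : (u.1 == k) = false := by simp only [beq_eq_false_iff_ne]; exact fun he => hk he.symm
      rw [if_neg (by simp [this])]
    have hgetu : PySem.Dict.getD (⟨u :: t⟩ : PySem.Dict String (List (String × String))) u.1 [] = u.2 := by
      rw [PySem.Dict.getD_eq_get?_getD, PySem.Dict.get?_mk_cons, if_pos (by simp)]
      rfl
    simp only [List.foldl_cons]
    set d' := PySem.Dict.insert d u.1 (g (PySem.Dict.getD d u.1 ⟨[]⟩) u.2) with hd'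
    have hkd' : d'.keys.Nodup := PySem.Dict.nodup_keys_insert d _ _ hkd
    have hcd' : ∀ k, k ≠ u.1 → d'.contains k = d.contains k := by
      intro k hk
      rw [hd', PySem.Dict.contains_insert]
      have : (k == u.1) = false := by simpa using hk
      simp [this]
    have hfil : ∀ hdc : Bool, d.contains u.1 = hdc →
        t.filter (fun p => !d'.contains p.1) = t.filter (fun p => !d.contains p.1) := by
      intro _ _
      apply List.filter_congr
      intro p hp
      have : p.1 ≠ u.1 := fun he => hu (he ▸ List.mem_map_of_mem hp)
      rw [hcd' p.1 this]
    rw [ih d' ht hkd']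
    by_cases hc : d.contains u.1 = true
    · -- existing stem: overwrite in place
      have hitems : d'.items = d.items.map (fun q => if q.1 = u.1 then (q.1, g q.2 u.2) else q) := by
        rw [hd', PySem.Dict.items_insert_of_contains d _ hc]
        apply List.map_congr_left
        intro q hq
        by_cases he : q.1 = u.1
        · have : d.getD u.1 ⟨[]⟩ = q.2 := by
            have hq' : (u.1, q.2) ∈ d.items := by
              have hqe : q = (u.1, q.2) := by rw [← he]
              exact hqe ▸ hq
            exact PySem.Dict.getD_of_mem_items d hq' hkd ⟨[]⟩
          simp [he, this]
        · simp [he]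
      rw [hitems, List.map_map]
      have hmap : List.map ((fun q => if PySem.Dict.contains (⟨t⟩ : PySem.Dict String (List (String × String))) q.1 then
              (q.1, g q.2 (PySem.Dict.getD (⟨t⟩ : PySem.Dict String (List (String × String))) q.1 [])) else q) ∘
            (fun q : String × PySem.Dict String String => if q.1 = u.1 then (q.1, g q.2 u.2) else q)) d.items
          = List.map (fun q => if PySem.Dict.contains (⟨u :: t⟩ : PySem.Dict String (List (String × String))) q.1 then
              (q.1, g q.2 (PySem.Dict.getD (⟨u :: t⟩ : PySem.Dict String (List (String × String))) q.1 [])) else q) d.items := by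
        apply List.map_congr_left
        intro q _
        by_cases he : q.1 = u.1
        · have hbq : (q.1 == u.1) = true := by simpa using he
          have hcont : PySem.Dict.contains (⟨t⟩ : PySem.Dict String (List (String × String))) q.1 = false := by
            rw [he]; exact hut
          have hgd : PySem.Dict.getD (⟨u :: t⟩ : PySem.Dict String (List (String × String))) q.1 [] = u.2 := by
            rw [he]; exact hgetu
          simp only [Function.comp_apply, if_pos he, hcont, Bool.false_eq_true, if_false,
            hmk, hbq, Bool.true_or, if_true, hgd]
        · have hbq : (q.1 == u.1) = false := by simpa using he
          simp only [Function.comp_apply, if_neg he, hmk, hbq, Bool.false_or, hget q.1 he]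
      rw [hmap, hfil true hc, List.filter_cons_of_neg (by simp [hc])]
    · -- fresh stem: appended
      have hc' : d.contains u.1 = false := by simpa using hc
      have hitems : d'.items = d.items ++ [(u.1, g (⟨[]⟩ : PySem.Dict String String) u.2)] := by
        rw [hd', PySem.Dict.getD_of_not_contains d _ hc', PySem.Dict.items_insert_of_not_contains d _ hc']
      rw [hitems, List.map_append]
      have hone : List.map (fun q => if PySem.Dict.contains (⟨t⟩ : PySem.Dict String (List (String × String))) q.1 then
              (q.1, g q.2 (PySem.Dict.getD (⟨t⟩ : PySem.Dict String (List (String × String))) q.1 [])) else q)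
            [(u.1, g (⟨[]⟩ : PySem.Dict String String) u.2)]
          = [(u.1, g (⟨[]⟩ : PySem.Dict String String) u.2)] := by
        simp only [List.map_cons, List.map_nil, hut, Bool.false_eq_true, if_false]
      have hmap : List.map (fun q => if PySem.Dict.contains (⟨t⟩ : PySem.Dict String (List (String × String))) q.1 then
              (q.1, g q.2 (PySem.Dict.getD (⟨t⟩ : PySem.Dict String (List (String × String))) q.1 [])) else q) d.items
          = List.map (fun q => if PySem.Dict.contains (⟨u :: t⟩ : PySem.Dict String (List (String × String))) q.1 then
              (q.1, g q.2 (PySem.Dict.getD (⟨u :: t⟩ : PySem.Dict String (List (String × String))) q.1 [])) else q) d.items := by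
        apply List.map_congr_left
        intro q hq
        have he : q.1 ≠ u.1 := by
          intro he
          have : d.contains u.1 = true :=
            (PySem.Dict.contains_iff_mem_keys d u.1).mpr (he ▸ PySem.Dict.mem_keys_of_mem_items d hq)
          simp [this] at hc'
        have hbq : (q.1 == u.1) = false := by simpa using he
        simp only [hmk, hbq, Bool.false_or, hget q.1 he]
      rw [hmap, hone, hfil false hc', List.filter_cons_of_pos (by simp [hc']), List.map_cons,
        List.append_assoc]
      rfl

theorem filter_map_congr {α β : Type} (c1 c2 : α → Bool) (m1 m2 : α → β) :
    ∀ (l : List α), (∀ a ∈ l, c1 a = c2 a ∧ (c1 a = true → m1 a = m2 a)) →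
    (l.filter c1).map m1 = (l.filter c2).map m2 := by
  intro l
  induction l with
  | nil => intro _; simp
  | cons a t ih =>
    intro h
    obtain ⟨hc, hm⟩ := h a List.mem_cons_self
    have ht := fun x hx => h x (List.mem_cons_of_mem a hx)
    simp only [List.filter_cons, ← hc]
    cases hca : c1 a
    · simp only [Bool.false_eq_true, if_false]
      exact ih ht
    · simp only [if_true, List.map_cons, hm hca]
      rw [ih ht]

theorem classify_keys_eq_canon (prefilled user : List (String × List (String × String)))
    (h : Pre_classify_keys prefilled user) :
    classify_keys prefilled user = pvCanon prefilled user := by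
  obtain ⟨h1, h2, h3, h4⟩ := h
  have hgetp : ∀ p ∈ prefilled, PySem.Dict.getD (⟨prefilled⟩ : PySem.Dict String (List (String × String))) p.1 [] = p.2 := by
    intro p hp
    exact PySem.Dict.getD_of_mem_items _ (by exact hp) (by rw [PySem.Dict.keys_mk]; exact h1) []
  have hgetu : ∀ p ∈ user, PySem.Dict.getD (⟨user⟩ : PySem.Dict String (List (String × String))) p.1 [] = p.2 := by
    intro p hp
    exact PySem.Dict.getD_of_mem_items _ (by exact hp) (by rw [PySem.Dict.keys_mk]; exact h2) []
  have hnotp : ∀ x, x ∉ prefilled.map Prod.fst →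
      PySem.Dict.getD (⟨prefilled⟩ : PySem.Dict String (List (String × String))) x [] = [] := by
    intro x hx
    apply PySem.Dict.getD_of_not_contains
    rw [PySem.Dict.contains_mk]
    simp only [List.any_eq_false]
    intro p hp he
    exact hx ((eq_of_beq he) ▸ List.mem_map_of_mem hp)
  set f : String → List (String × String) := fun s =>
    pvRow (PySem.Dict.getD (⟨prefilled⟩ : PySem.Dict String (List (String × String))) s [])
          (PySem.Dict.getD (⟨user⟩ : PySem.Dict String (List (String × String))) s []) with hf
  set S := PySem.Set.union (PySem.Set.ofList (prefilled.map Prod.fst))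
      (PySem.Set.ofList (user.map Prod.fst)) with hS
  have hSnd : S.Nodup := by
    rw [hS, PySem.Set.union_eq_update]
    exact PySem.Set.nodup_update _ _ (PySem.Set.nodup_ofList _)
  unfold classify_keys
  rw [PySem.List.foldl_congr_mem _ _
      (fun out s => if f s = [] then out else PySem.Dict.insert out s (f s)) _
      (by intro acc s _
          show (if _ = ([] : List (String × String)) then acc else _) = _
          rw [rowA_items])]
  rw [cond_insert_items f S ⟨[]⟩ hSnd (by intro s _; rw [PySem.Dict.contains_mk]; rfl)]
  have e1 : PySem.Set.ofList (prefilled.map Prod.fst) = prefilled.map Prod.fst := by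
    rw [← PySem.List.dedup_eq_ofList]; exact dedup_of_nodup _ h1
  have e2 : PySem.Set.ofList (user.map Prod.fst) = user.map Prod.fst := by
    rw [← PySem.List.dedup_eq_ofList]; exact dedup_of_nodup _ h2
  have hSdecomp : S = prefilled.map Prod.fst
      ++ (user.map Prod.fst).filter
          (fun k => !PySem.Set.contains (PySem.Set.ofList (prefilled.map Prod.fst)) k) := by
    rw [hS, PySem.Set.union_eq_update, PySem.Set.update_eq_append_filter, PySem.Set.ofList_ofList, e2]
    nth_rewrite 1 [e1]
    rfl
  rw [hSdecomp, List.filter_append, List.map_append, List.nil_append]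
  unfold pvCanon
  rw [List.filter_append]
  congr 1
  · -- prefilled segment
    conv_lhs => rw [List.filter_map, List.map_map]
    conv_rhs => rw [List.filter_map]
    apply filter_map_congr
    intro p hp
    constructor
    · simp only [Function.comp_apply, hf, hgetp p hp]
    · intro _
      simp only [Function.comp_apply, hf, hgetp p hp]
  · -- user-only segment
    conv_lhs => rw [List.filter_map, List.filter_map, List.map_map, List.filter_filter]
    conv_rhs => rw [List.filter_map, List.filter_filter]
    apply filter_map_congr
    intro p hp
    by_cases hc : PySem.Set.contains (PySem.Set.ofList (prefilled.map Prod.fst)) p.1 = true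
    · have hmemo : p.1 ∈ PySem.Set.ofList (prefilled.map Prod.fst) :=
        (PySem.Set.contains_iff _ _).mp hc
      constructor
      · simp [hmemo]
      · intro hcond
        exfalso
        simp [hmemo] at hcond
    · have hnp : p.1 ∉ prefilled.map Prod.fst := fun hm =>
        hc ((PySem.Set.contains_iff _ _).mpr ((PySem.Set.mem_ofList _ _).mpr hm))
      constructor
      · simp only [Function.comp_apply, hf, hgetu p hp, hnotp p.1 hnp]
      · intro _
        simp only [Function.comp_apply, hf, hgetu p hp, hnotp p.1 hnp]

theorem classify_keys_alt_eq_canon (prefilled user : List (String × List (String × String)))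
    (h : Pre_classify_keys prefilled user) :
    classify_keys_alt prefilled user = pvCanon prefilled user := by
  obtain ⟨h1, h2, h3, h4⟩ := h
  set g : PySem.Dict String String → List (String × String) → PySem.Dict String String :=
    fun r v => List.foldl (fun r k => PySem.Dict.insert r k "operator_override") r (v.map Prod.fst)
    with hg
  set pairf : (String × List (String × String)) → String × PySem.Dict String String :=
    fun p => (p.1, (⟨(PySem.List.dedup (p.2.map Prod.fst)).map (fun k => (k, "derived"))⟩ : PySem.Dict String String))
    with hpairf
  show ((List.foldl (fun out p => PySem.Dict.insert out p.1 (g (PySem.Dict.getD out p.1 ⟨[]⟩) p.2))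
        (List.foldl (fun out p => PySem.Dict.insert out p.1 (pairf p).2) ⟨[]⟩ prefilled)
        user).items.filter (fun q => !q.2.items.isEmpty)).map (fun q => (q.1, q.2.items))
      = pvCanon prefilled user
  set D1 : PySem.Dict String (PySem.Dict String String) :=
    List.foldl (fun out p => PySem.Dict.insert out p.1 (pairf p).2) ⟨[]⟩ prefilled with hD1
  have hD1items : D1.items = prefilled.map pairf := by
    rw [hD1, PySem.Dict.items_foldl_insert_fresh prefilled Prod.fst (fun p => (pairf p).2) ⟨[]⟩
      (by intro a _; rw [PySem.Dict.contains_mk]; rfl) h1]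
    rfl
  have hD1keys : D1.keys = prefilled.map Prod.fst := by
    simp only [PySem.Dict.keys, hD1items, List.map_map]
    rfl
  have hD1nd : D1.keys.Nodup := by rw [hD1keys]; exact h1
  have hD1c : ∀ x, D1.contains x = PySem.Set.contains (PySem.Set.ofList (prefilled.map Prod.fst)) x := by
    intro x
    rw [Bool.eq_iff_iff, PySem.Dict.contains_iff_mem_keys, hD1keys, PySem.Set.contains_iff,
      PySem.Set.mem_ofList]
  rw [update_items g user D1 h2 hD1nd, hD1items]
  have hgetu : ∀ p ∈ user, PySem.Dict.getD (⟨user⟩ : PySem.Dict String (List (String × String))) p.1 [] = p.2 := by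
    intro p hp
    exact PySem.Dict.getD_of_mem_items _ (by exact hp) (by rw [PySem.Dict.keys_mk]; exact h2) []
  have hF12 : ∀ p ∈ prefilled,
      ((if PySem.Dict.contains (⟨user⟩ : PySem.Dict String (List (String × String))) (pairf p).1 then
          ((pairf p).1, g (pairf p).2 (PySem.Dict.getD (⟨user⟩ : PySem.Dict String (List (String × String))) (pairf p).1 []))
        else pairf p).1 = p.1)
      ∧ ((if PySem.Dict.contains (⟨user⟩ : PySem.Dict String (List (String × String))) (pairf p).1 then
          ((pairf p).1, g (pairf p).2 (PySem.Dict.getD (⟨user⟩ : PySem.Dict String (List (String × String))) (pairf p).1 []))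
        else pairf p).2.items
        = pvRow p.2 (PySem.Dict.getD (⟨user⟩ : PySem.Dict String (List (String × String))) p.1 [])) := by
    intro p hp
    by_cases hcu : PySem.Dict.contains (⟨user⟩ : PySem.Dict String (List (String × String))) (pairf p).1 = true
    · have hsome : (PySem.Dict.get? (⟨user⟩ : PySem.Dict String (List (String × String))) p.1).isSome := by
        rw [← PySem.Dict.contains_eq_isSome_get?]; exact hcu
      obtain ⟨v, hv⟩ := Option.isSome_iff_exists.mp hsome
      have hvmem : (p.1, v) ∈ user := by
        have := (PySem.Dict.get?_eq_some_iff_mem_items (⟨user⟩ : PySem.Dict String (List (String × String))) p.1 v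
          (by rw [PySem.Dict.keys_mk]; exact h2)).mp hv
        exact this
      have hvget : PySem.Dict.getD (⟨user⟩ : PySem.Dict String (List (String × String))) p.1 [] = v := by
        rw [PySem.Dict.getD_eq_get?_getD, hv]; rfl
      have hvnd : (v.map Prod.fst).Nodup := h4 (p.1, v) hvmem
      constructor
      · rw [if_pos hcu]
      · rw [if_pos hcu]
        show (g (pairf p).2 (PySem.Dict.getD (⟨user⟩ : PySem.Dict String (List (String × String))) p.1 [])).items = _
        rw [hvget, hg, hpairf]
        exact rowB_items p.2 v hvnd
    · have hcu' : PySem.Dict.contains (⟨user⟩ : PySem.Dict String (List (String × String))) p.1 = false :=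
        Bool.eq_false_iff.mpr hcu
      have hvget : PySem.Dict.getD (⟨user⟩ : PySem.Dict String (List (String × String))) p.1 [] = [] :=
        PySem.Dict.getD_of_not_contains _ _ hcu'
      constructor
      · rw [if_neg hcu]
      · rw [if_neg hcu, hvget]
        show ((PySem.List.dedup (p.2.map Prod.fst)).map (fun k => (k, "derived")) : List (String × String)) = _
        simp [pvRow]
  have hG0 : ∀ p ∈ user, (g (⟨[]⟩ : PySem.Dict String String) p.2).items = pvRow [] p.2 := by
    intro p hp
    have := rowB_items [] p.2 (h4 p hp)
    simpa using this
  rw [List.filter_append, List.map_append]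
  unfold pvCanon
  rw [List.filter_append]
  congr 1
  · -- prefilled segment
    conv_lhs => rw [List.map_map, List.filter_map, List.map_map]
    conv_rhs => rw [List.filter_map]
    apply filter_map_congr
    intro p hp
    obtain ⟨hF1, hF2⟩ := hF12 p hp
    constructor
    · simp only [Function.comp_apply, hF2]
    · intro _
      simp only [Function.comp_apply, hF1, hF2]
  · -- user-only segment
    conv_lhs => rw [List.filter_map, List.map_map, List.filter_filter]
    conv_rhs => rw [List.filter_map, List.filter_filter]
    apply filter_map_congr
    intro p hp
    constructor
    · simp only [Function.comp_apply, hG0 p hp, hD1c]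
    · intro _
      simp only [Function.comp_apply, hG0 p hp]

-- ===== VERDICT =====
theorem classify_keys_spec : Claim_equal_classify_keys := by
  intro prefilled user _ hpre
  unfold Spec_classify_keys
  rw [classify_keys_eq_canon prefilled user hpre, classify_keys_alt_eq_canon prefilled user hpre]
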